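-- pv_equiv track=rewrite | github.com/indrkl/Secret_TTRPG | TTRPG/pdf_utils/styles.py | add_dice_images
-- ===== SOURCE A (Python) =====
-- def add_dice_images(some_str, size=15):
--     map = {
--         'R1': f'<img src="images/one.png" width={size} height={size} />',
--         'R2': f'<img src="images/two.png" width={size} height={size} />',
--         'R3': f'<img src="images/three.png" width={size} height={size} />',
--         'R4': f'<img src="images/four.png" width={size} height={size} />',
--         'R5': f'<img src="images/five.png" width={size} height={size} />',
--         'R6': f'<img src="images/six.png" width={size} height={size} />',
--     }
--
--     for key in map:
--         some_str = some_str.replace(key, map[key])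
--     return some_str
-- ===== SOURCE B (Python) =====
-- def add_dice_images(some_str, size=15):
--     # Single left-to-right scan: emit an img tag at each dice code ('R' followed by
--     # a digit 1-6), copy every other character unchanged. No repeated full-string passes.
--     names = ['one', 'two', 'three', 'four', 'five', 'six']
--     digits = '123456'
--     out = []
--     i = 0
--     n = len(some_str)
--     while i < n:
--         c = some_str[i]
--         if c == 'R' and i + 1 < n and some_str[i + 1] in digits:
--             name = names[digits.index(some_str[i + 1])]
--             out.append(f'<img src="images/{name}.png" width={size} height={size} />')
--             i += 2
--         else:
--             out.append(c)
--             i += 1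
--     return ''.join(out)
-- ===== Notes on version B (the rewrite author's own statement) =====
-- stated objective: alternative
-- what changed: Replaced six sequential full-string .replace passes (one per dice code in the dict) with a single left-to-right index scan that emits the img tag at each dice code and copies every other character.
import Mathlib
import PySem

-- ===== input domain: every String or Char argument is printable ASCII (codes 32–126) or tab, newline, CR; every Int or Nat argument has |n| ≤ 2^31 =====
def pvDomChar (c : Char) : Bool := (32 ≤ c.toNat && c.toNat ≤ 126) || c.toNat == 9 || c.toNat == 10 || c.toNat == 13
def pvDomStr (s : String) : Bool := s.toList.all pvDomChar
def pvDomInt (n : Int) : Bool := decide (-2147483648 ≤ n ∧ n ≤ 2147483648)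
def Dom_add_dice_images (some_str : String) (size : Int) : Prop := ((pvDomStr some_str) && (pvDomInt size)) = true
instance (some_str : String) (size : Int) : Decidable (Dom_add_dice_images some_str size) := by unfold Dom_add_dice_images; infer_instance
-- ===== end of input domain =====

-- B replaces A's six sequential full-string .replace passes by a single left-to-right scan over the characters (alternative algorithm; return value proved equal).


-- ===== PORT A =====
-- the f-string value used in A's dict literal: f'<img src="images/{name}.png" width={size} height={size} />'
def pvTagA (name : String) (size : Int) : String :=
  "<img src=\"images/" ++ name ++ ".png\" width=" ++ PySem.Int.toStr size ++ " height=" ++ PySem.Int.toStr size ++ " />"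

def add_dice_images (some_str : String) (size : Int) : String :=
  let map : PySem.Dict String String :=
    ((((((PySem.Dict.empty).insert "R1" (pvTagA "one" size)).insert "R2" (pvTagA "two" size)).insert
        "R3" (pvTagA "three" size)).insert "R4" (pvTagA "four" size)).insert
        "R5" (pvTagA "five" size)).insert "R6" (pvTagA "six" size)
  map.keys.foldl (fun s key => PySem.Str.replace s key (map.getD key "")) some_str

-- ===== PORT B =====
-- Source B's f-string piece, as a char list
def pvTagB (name : String) (size : Int) : List Char :=
  "<img src=\"images/".toList ++ name.toList ++ ".png\" width=".toList ++
    PySem.Int.toChars size ++ " height=".toList ++ PySem.Int.toChars size ++ " />".toList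

def pvDigits : List Char := ['1', '2', '3', '4', '5', '6']

def pvNames : List String := ["one", "two", "three", "four", "five", "six"]

-- Source B's while loop: one pass, consuming two chars at a dice code, one char otherwise
def pvScan (size : Int) : List Char → List Char
  | [] => []
  | [c] => [c]
  | c :: d :: t =>
    if c = 'R' ∧ d ∈ pvDigits then
      pvTagB (PySem.List.pyGetD pvNames (((PySem.List.index? pvDigits d).getD 0 : Nat) : Int) "") size
        ++ pvScan size t
    else c :: pvScan size (d :: t)

def add_dice_images_alt (some_str : String) (size : Int) : String :=
  String.ofList (pvScan size some_str.toList)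

-- ===== PRECONDITION & SPEC =====
def Spec_add_dice_images (some_str : String) (size : Int) (out : String) : Prop := out = add_dice_images_alt some_str size
instance (some_str : String) (size : Int) (out : String) : Decidable (Spec_add_dice_images some_str size out) := by unfold Spec_add_dice_images; infer_instance

-- ===== CLAIM (what is proved, stated in full; the proofs are below) =====
def Claim_equal_add_dice_images : Prop := ∀ (some_str : String) (size : Int), Dom_add_dice_images some_str size → Spec_add_dice_images some_str size (add_dice_images some_str size)

-- ===== LEMMAS AND PROOFS =====

lemma pv_go_acc (old new : List Char) :
    ∀ (fuel : Nat) (l acc : List Char),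
      PySem.Chars.replace.go old new fuel l acc = acc.reverse ++ PySem.Chars.replace.go old new fuel l [] := by
  intro fuel
  induction fuel with
  | zero => intro l acc; rw [PySem.Chars.replace.go.eq_def, PySem.Chars.replace.go.eq_def]; simp
  | succ f ih =>
    intro l acc
    cases l with
    | nil => rw [PySem.Chars.replace.go.eq_def, PySem.Chars.replace.go.eq_def]; simp
    | cons c t =>
      rw [PySem.Chars.replace.go.eq_def]
      conv_rhs => rw [PySem.Chars.replace.go.eq_def]
      by_cases h : old.isPrefixOf (c :: t) = true
      · simp only [h, if_true]
        rw [ih _ (new.reverse ++ acc), ih _ (new.reverse ++ [])]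
        simp
      · simp only [h]
        rw [ih t (c :: acc), ih t (c :: [])]
        simp

lemma pv_go_fuel (old new : List Char) (hold : old ≠ []) :
    ∀ (n : Nat) (l : List Char) (fuel : Nat) (acc : List Char), l.length ≤ n → l.length ≤ fuel →
      PySem.Chars.replace.go old new fuel l acc = PySem.Chars.replace.go old new l.length l acc := by
  intro n
  induction n with
  | zero =>
    intro l fuel acc h0 _
    have : l = [] := List.length_eq_zero_iff.mp (Nat.le_zero.mp h0)
    subst this
    cases fuel with
    | zero =>
        rw [PySem.Chars.replace.go.eq_def]
        conv_rhs => rw [PySem.Chars.replace.go.eq_def]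
        simp
    | succ f =>
      rw [PySem.Chars.replace.go.eq_def]
      conv_rhs => rw [PySem.Chars.replace.go.eq_def]
      simp
  | succ n ih =>
    intro l fuel acc hn hf
    cases l with
    | nil =>
      cases fuel with
      | zero =>
        rw [PySem.Chars.replace.go.eq_def]
        conv_rhs => rw [PySem.Chars.replace.go.eq_def]
        simp
      | succ f =>
        rw [PySem.Chars.replace.go.eq_def]
        conv_rhs => rw [PySem.Chars.replace.go.eq_def]
        simp
    | cons c t =>
      cases fuel with
      | zero => simp at hf
      | succ f =>
        rw [PySem.Chars.replace.go.eq_def]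
        conv_rhs => rw [show (c :: t).length = t.length + 1 from rfl, PySem.Chars.replace.go.eq_def]
        have holdlen : 0 < old.length := List.length_pos_iff.mpr hold
        by_cases h : old.isPrefixOf (c :: t) = true
        · simp only [h, if_true]
          have hdl : (List.drop old.length (c :: t)).length ≤ t.length := by
            simp [List.length_drop]; omega
          rw [ih _ f _ (by simp at hn; omega) (by simp at hf; omega),
              ih _ t.length _ (by simp at hn; omega) hdl]
        · simp only [h]
          rw [ih t f _ (by simp at hn; omega) (by simp at hf; omega),
              ih t t.length _ (by simp at hn; omega) le_rfl]
          simp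

lemma pv_rep_nil (d : Char) (new : List Char) : PySem.Chars.replace [] ['R', d] new = [] := by
  unfold PySem.Chars.replace
  rw [PySem.Chars.replace.go.eq_def]
  simp

lemma pv_rep_match (d : Char) (new t : List Char) :
    PySem.Chars.replace ('R' :: d :: t) ['R', d] new = new ++ PySem.Chars.replace t ['R', d] new := by
  unfold PySem.Chars.replace
  simp only [List.isEmpty_cons, Bool.false_eq_true, if_false]
  rw [PySem.Chars.replace.go.eq_def]
  have hp : List.isPrefixOf ['R', d] ('R' :: d :: t) = true := by
    simp [List.isPrefixOf]
  simp only [List.length_cons, hp, if_true]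
  have hdrop : List.drop (([] : List Char).length + 1 + 1) ('R' :: d :: t) = t := by simp
  rw [hdrop, pv_go_acc, pv_go_fuel ['R', d] new (by simp) (t.length + 1) t _ _ (by omega) (by omega)]
  simp

lemma pv_rep_skip (d c : Char) (new t : List Char)
    (h : ¬ List.isPrefixOf ['R', d] (c :: t) = true) :
    PySem.Chars.replace (c :: t) ['R', d] new = c :: PySem.Chars.replace t ['R', d] new := by
  unfold PySem.Chars.replace
  simp only [List.isEmpty_cons, Bool.false_eq_true, if_false]
  rw [PySem.Chars.replace.go.eq_def]
  simp only [List.length_cons, h]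
  rw [pv_go_acc ['R', d] new t.length t [c]]
  simp

lemma pv_rep_append (d : Char) (new a b : List Char) (ha : ∀ c ∈ a, c ≠ 'R') :
    PySem.Chars.replace (a ++ b) ['R', d] new =
      a ++ PySem.Chars.replace b ['R', d] new := by
  induction a with
  | nil => simp
  | cons c a ih =>
    have hc : c ≠ 'R' := ha c (by simp)
    have hnp : ¬ List.isPrefixOf ['R', d] (c :: (a ++ b)) = true := by
      simp only [List.isPrefixOf, Bool.and_eq_true, beq_iff_eq]
      intro hcontr
      exact hc hcontr.1.symm
    rw [List.cons_append, pv_rep_skip d c new (a ++ b) hnp,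
        ih (fun x hx => ha x (by simp [hx]))]
    simp

def pvRep (d : Char) (size : Int) (l : List Char) : List Char :=
  PySem.Chars.replace l ['R', d]
    (pvTagB (PySem.List.pyGetD pvNames (((PySem.List.index? pvDigits d).getD 0 : Nat) : Int) "") size)

def pvRepAll (size : Int) (l : List Char) : List Char :=
  pvRep '6' size (pvRep '5' size (pvRep '4' size (pvRep '3' size (pvRep '2' size (pvRep '1' size l)))))

lemma pv_digitChar_ne_R (n : Nat) : Nat.digitChar n ≠ 'R' := by
  rcases Nat.lt_or_ge n 16 with hlt | hge
  · interval_cases n <;> decide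
  · have h : Nat.digitChar n = '*' := by
      unfold Nat.digitChar
      rw [if_neg (by omega), if_neg (by omega), if_neg (by omega), if_neg (by omega),
          if_neg (by omega), if_neg (by omega), if_neg (by omega), if_neg (by omega),
          if_neg (by omega), if_neg (by omega), if_neg (by omega), if_neg (by omega),
          if_neg (by omega), if_neg (by omega), if_neg (by omega), if_neg (by omega)]
    rw [h]; decide

lemma pv_toDigitsCore_noR : ∀ (fuel n : Nat) (acc : List Char), (∀ c ∈ acc, c ≠ 'R') →
    ∀ c ∈ Nat.toDigitsCore 10 fuel n acc, c ≠ 'R' := by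
  intro fuel
  induction fuel with
  | zero => intro n acc hacc; rw [Nat.toDigitsCore.eq_def]; exact hacc
  | succ f ih =>
    intro n acc hacc
    rw [Nat.toDigitsCore.eq_def]
    by_cases h : n / 10 = 0
    · simp only [h, if_true]
      intro c hc
      rcases List.mem_cons.mp hc with h1 | h2
      · subst h1; exact pv_digitChar_ne_R _
      · exact hacc c h2
    · simp only [h, if_false]
      exact ih _ _ (by
        intro c hc
        rcases List.mem_cons.mp hc with h1 | h2
        · subst h1; exact pv_digitChar_ne_R _
        · exact hacc c h2)

lemma pv_toChars_noR (n : Int) : ∀ c ∈ PySem.Int.toChars n, c ≠ 'R' := by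
  unfold PySem.Int.toChars
  split_ifs with h
  · intro c hc
    rcases List.mem_cons.mp hc with h1 | h2
    · subst h1; decide
    · exact pv_toDigitsCore_noR _ _ [] (by simp) c h2
  · exact pv_toDigitsCore_noR _ _ [] (by simp)

lemma pv_tagB_noR (name : String) (size : Int) (hname : ∀ c ∈ name.toList, c ≠ 'R') :
    ∀ c ∈ pvTagB name size, c ≠ 'R' := by
  unfold pvTagB
  intro c hc
  simp only [List.mem_append] at hc
  rcases hc with (((((hc | hc) | hc) | hc) | hc) | hc) | hc
  · exact fun h => absurd (h ▸ hc) (by decide)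
  · exact hname c hc
  · exact fun h => absurd (h ▸ hc) (by decide)
  · exact pv_toChars_noR size c hc
  · exact fun h => absurd (h ▸ hc) (by decide)
  · exact pv_toChars_noR size c hc
  · exact fun h => absurd (h ▸ hc) (by decide)

lemma pv_nm1 : PySem.List.pyGetD pvNames (((PySem.List.index? pvDigits '1').getD 0 : Nat) : Int) "" = "one" := by decide
lemma pv_nm2 : PySem.List.pyGetD pvNames (((PySem.List.index? pvDigits '2').getD 0 : Nat) : Int) "" = "two" := by decide
lemma pv_nm3 : PySem.List.pyGetD pvNames (((PySem.List.index? pvDigits '3').getD 0 : Nat) : Int) "" = "three" := by decide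
lemma pv_nm4 : PySem.List.pyGetD pvNames (((PySem.List.index? pvDigits '4').getD 0 : Nat) : Int) "" = "four" := by decide
lemma pv_nm5 : PySem.List.pyGetD pvNames (((PySem.List.index? pvDigits '5').getD 0 : Nat) : Int) "" = "five" := by decide
lemma pv_nm6 : PySem.List.pyGetD pvNames (((PySem.List.index? pvDigits '6').getD 0 : Nat) : Int) "" = "six" := by decide

lemma pv_np1 (i c : Char) (t : List Char) (h : c ≠ 'R') :
    ¬ List.isPrefixOf ['R', i] (c :: t) = true := by
  simp only [List.isPrefixOf, Bool.and_eq_true, beq_iff_eq]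
  intro hcontr
  exact h hcontr.1.symm

lemma pv_np2 (i d : Char) (t : List Char) (h : i ≠ d) :
    ¬ List.isPrefixOf ['R', i] ('R' :: d :: t) = true := by
  simp only [List.isPrefixOf, Bool.and_eq_true, beq_iff_eq]
  intro hcontr
  exact h hcontr.2.1


lemma pv_prefix_shape (i c : Char) (t : List Char)
    (h : List.isPrefixOf ['R', i] (c :: t) = true) : c = 'R' ∧ ∃ t', t = i :: t' := by
  cases t with
  | nil => simp [List.isPrefixOf] at h
  | cons d t' =>
    simp only [List.isPrefixOf, Bool.and_eq_true, beq_iff_eq] at h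
    exact ⟨h.1.symm, t', by rw [h.2.1]⟩

lemma pv_tagB_head (name : String) (size : Int) : (pvTagB name size).head? = some '<' := rfl

lemma pv_rep_headRL (i : Char) (new l : List Char)
    (hl : l.head? = some 'R' ∨ l.head? = some '<') (hnew : new.head? = some '<') :
    (PySem.Chars.replace l ['R', i] new).head? = some 'R' ∨
      (PySem.Chars.replace l ['R', i] new).head? = some '<' := by
  cases l with
  | nil => simp at hl
  | cons c t =>
    by_cases hp : List.isPrefixOf ['R', i] (c :: t) = true
    · obtain ⟨rfl, t', rfl⟩ := pv_prefix_shape i c t hp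
      rw [pv_rep_match]
      cases new with
      | nil => simp at hnew
      | cons x xs => simp at hnew; simp [hnew]
    · rw [pv_rep_skip _ _ _ _ hp]
      simpa using hl

lemma pv_np_head (i : Char) (Y : List Char)
    (hY : Y.head? = some 'R' ∨ Y.head? = some '<') (hiR : i ≠ 'R') (hiL : i ≠ '<') :
    ¬ List.isPrefixOf ['R', i] ('R' :: Y) = true := by
  intro h
  obtain ⟨-, t', ht'⟩ := pv_prefix_shape i 'R' Y h
  subst ht'
  rcases hY with hY | hY <;> simp at hY
  · exact hiR hY
  · exact hiL hY

lemma pv_scan_cons (size : Int) (d : Char) (t : List Char) (hd : d ≠ 'R') :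
    pvScan size (d :: t) = d :: pvScan size t := by
  cases t with
  | nil => rfl
  | cons e t' => simp [pvScan, hd]

set_option maxHeartbeats 2000000 in
set_option maxRecDepth 8192 in
lemma pv_main (size : Int) : ∀ (n : Nat) (l : List Char), l.length ≤ n →
    pvRepAll size l = pvScan size l := by
  intro n
  induction n with
  | zero =>
    intro l h0
    have : l = [] := List.length_eq_zero_iff.mp (Nat.le_zero.mp h0)
    subst this
    simp [pvRepAll, pvRep, pv_rep_nil, pvScan]
  | succ n ih =>
    intro l hn
    match l with
    | [] => simp [pvRepAll, pvRep, pv_rep_nil, pvScan]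
    | [c] =>
      by_cases hc : c = 'R'
      · subst hc
        simp only [pvRepAll, pvRep]
        rw [pv_rep_skip _ _ _ _ (by decide), pv_rep_nil,
            pv_rep_skip _ _ _ _ (by decide), pv_rep_nil,
            pv_rep_skip _ _ _ _ (by decide), pv_rep_nil,
            pv_rep_skip _ _ _ _ (by decide), pv_rep_nil,
            pv_rep_skip _ _ _ _ (by decide), pv_rep_nil,
            pv_rep_skip _ _ _ _ (by decide), pv_rep_nil]
        simp [pvScan]
      · simp only [pvRepAll, pvRep]
        rw [pv_rep_skip _ _ _ _ (pv_np1 _ _ _ hc), pv_rep_nil,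
            pv_rep_skip _ _ _ _ (pv_np1 _ _ _ hc), pv_rep_nil,
            pv_rep_skip _ _ _ _ (pv_np1 _ _ _ hc), pv_rep_nil,
            pv_rep_skip _ _ _ _ (pv_np1 _ _ _ hc), pv_rep_nil,
            pv_rep_skip _ _ _ _ (pv_np1 _ _ _ hc), pv_rep_nil,
            pv_rep_skip _ _ _ _ (pv_np1 _ _ _ hc), pv_rep_nil]
        simp [pvScan]
    | c :: d :: t =>
      have ht : t.length ≤ n := by simp at hn; omega
      have hdt : (d :: t).length ≤ n := by simp at hn ⊢; omega
      by_cases hc : c = 'R'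
      · subst hc
        by_cases hd : d ∈ pvDigits
        · have ihl := ih t ht
          simp only [pvRepAll, pvRep, pv_nm1, pv_nm2, pv_nm3, pv_nm4, pv_nm5, pv_nm6] at ihl ⊢
          fin_cases hd
          · rw [pv_rep_match]
            rw [pv_rep_append '2' _ _ _ (pv_tagB_noR "one" size (by simp))]
            rw [pv_rep_append '3' _ _ _ (pv_tagB_noR "one" size (by simp))]
            rw [pv_rep_append '4' _ _ _ (pv_tagB_noR "one" size (by simp))]
            rw [pv_rep_append '5' _ _ _ (pv_tagB_noR "one" size (by simp))]
            rw [pv_rep_append '6' _ _ _ (pv_tagB_noR "one" size (by simp))]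
            rw [ihl]
            simp [pvScan, pvDigits, pvNames, PySem.List.index?, PySem.List.pyGetD]
          · rw [pv_rep_skip _ _ _ _ (pv_np2 '1' '2' _ (by decide))]
            rw [pv_rep_skip _ _ _ _ (pv_np1 '1' '2' _ (by decide))]
            rw [pv_rep_match]
            rw [pv_rep_append '3' _ _ _ (pv_tagB_noR "two" size (by simp))]
            rw [pv_rep_append '4' _ _ _ (pv_tagB_noR "two" size (by simp))]
            rw [pv_rep_append '5' _ _ _ (pv_tagB_noR "two" size (by simp))]
            rw [pv_rep_append '6' _ _ _ (pv_tagB_noR "two" size (by simp))]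
            rw [ihl]
            simp [pvScan, pvDigits, pvNames, PySem.List.index?, PySem.List.pyGetD]
            rfl
          · rw [pv_rep_skip _ _ _ _ (pv_np2 '1' '3' _ (by decide))]
            rw [pv_rep_skip _ _ _ _ (pv_np1 '1' '3' _ (by decide))]
            rw [pv_rep_skip _ _ _ _ (pv_np2 '2' '3' _ (by decide))]
            rw [pv_rep_skip _ _ _ _ (pv_np1 '2' '3' _ (by decide))]
            rw [pv_rep_match]
            rw [pv_rep_append '4' _ _ _ (pv_tagB_noR "three" size (by simp))]
            rw [pv_rep_append '5' _ _ _ (pv_tagB_noR "three" size (by simp))]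
            rw [pv_rep_append '6' _ _ _ (pv_tagB_noR "three" size (by simp))]
            rw [ihl]
            simp [pvScan, pvDigits, pvNames, PySem.List.index?, PySem.List.pyGetD]
            rfl
          · rw [pv_rep_skip _ _ _ _ (pv_np2 '1' '4' _ (by decide))]
            rw [pv_rep_skip _ _ _ _ (pv_np1 '1' '4' _ (by decide))]
            rw [pv_rep_skip _ _ _ _ (pv_np2 '2' '4' _ (by decide))]
            rw [pv_rep_skip _ _ _ _ (pv_np1 '2' '4' _ (by decide))]
            rw [pv_rep_skip _ _ _ _ (pv_np2 '3' '4' _ (by decide))]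
            rw [pv_rep_skip _ _ _ _ (pv_np1 '3' '4' _ (by decide))]
            rw [pv_rep_match]
            rw [pv_rep_append '5' _ _ _ (pv_tagB_noR "four" size (by simp))]
            rw [pv_rep_append '6' _ _ _ (pv_tagB_noR "four" size (by simp))]
            rw [ihl]
            simp [pvScan, pvDigits, pvNames, PySem.List.index?, PySem.List.pyGetD]
            rfl
          · rw [pv_rep_skip _ _ _ _ (pv_np2 '1' '5' _ (by decide))]
            rw [pv_rep_skip _ _ _ _ (pv_np1 '1' '5' _ (by decide))]
            rw [pv_rep_skip _ _ _ _ (pv_np2 '2' '5' _ (by decide))]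
            rw [pv_rep_skip _ _ _ _ (pv_np1 '2' '5' _ (by decide))]
            rw [pv_rep_skip _ _ _ _ (pv_np2 '3' '5' _ (by decide))]
            rw [pv_rep_skip _ _ _ _ (pv_np1 '3' '5' _ (by decide))]
            rw [pv_rep_skip _ _ _ _ (pv_np2 '4' '5' _ (by decide))]
            rw [pv_rep_skip _ _ _ _ (pv_np1 '4' '5' _ (by decide))]
            rw [pv_rep_match]
            rw [pv_rep_append '6' _ _ _ (pv_tagB_noR "five" size (by simp))]
            rw [ihl]
            simp [pvScan, pvDigits, pvNames, PySem.List.index?, PySem.List.pyGetD]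
            rfl
          · rw [pv_rep_skip _ _ _ _ (pv_np2 '1' '6' _ (by decide))]
            rw [pv_rep_skip _ _ _ _ (pv_np1 '1' '6' _ (by decide))]
            rw [pv_rep_skip _ _ _ _ (pv_np2 '2' '6' _ (by decide))]
            rw [pv_rep_skip _ _ _ _ (pv_np1 '2' '6' _ (by decide))]
            rw [pv_rep_skip _ _ _ _ (pv_np2 '3' '6' _ (by decide))]
            rw [pv_rep_skip _ _ _ _ (pv_np1 '3' '6' _ (by decide))]
            rw [pv_rep_skip _ _ _ _ (pv_np2 '4' '6' _ (by decide))]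
            rw [pv_rep_skip _ _ _ _ (pv_np1 '4' '6' _ (by decide))]
            rw [pv_rep_skip _ _ _ _ (pv_np2 '5' '6' _ (by decide))]
            rw [pv_rep_skip _ _ _ _ (pv_np1 '5' '6' _ (by decide))]
            rw [pv_rep_match]
            rw [ihl]
            simp [pvScan, pvDigits, pvNames, PySem.List.index?, PySem.List.pyGetD]
            rfl
        · have hne : ∀ i ∈ pvDigits, i ≠ d := fun i hi h => hd (h ▸ hi)
          by_cases hdR : d = 'R'
          · subst hdR
            have ihR := ih ('R' :: t) (by simp at hn ⊢; omega)
            simp only [pvRepAll, pvRep, pv_nm1, pv_nm2, pv_nm3, pv_nm4, pv_nm5, pv_nm6] at ihR ⊢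
            have g1 := pv_rep_headRL '1' (pvTagB "one" size) ('R' :: t) (Or.inl rfl) (pv_tagB_head _ _)
            have g2 := pv_rep_headRL '2' (pvTagB "two" size) _ g1 (pv_tagB_head _ _)
            have g3 := pv_rep_headRL '3' (pvTagB "three" size) _ g2 (pv_tagB_head _ _)
            have g4 := pv_rep_headRL '4' (pvTagB "four" size) _ g3 (pv_tagB_head _ _)
            have g5 := pv_rep_headRL '5' (pvTagB "five" size) _ g4 (pv_tagB_head _ _)
            rw [pv_rep_skip _ _ _ _ (pv_np2 '1' 'R' _ (by decide)),
                pv_rep_skip _ _ _ _ (pv_np_head '2' _ g1 (by decide) (by decide)),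
                pv_rep_skip _ _ _ _ (pv_np_head '3' _ g2 (by decide) (by decide)),
                pv_rep_skip _ _ _ _ (pv_np_head '4' _ g3 (by decide) (by decide)),
                pv_rep_skip _ _ _ _ (pv_np_head '5' _ g4 (by decide) (by decide)),
                pv_rep_skip _ _ _ _ (pv_np_head '6' _ g5 (by decide) (by decide)),
                ihR]
            simp [pvScan, pvDigits]
          · have iht := ih t ht
            simp only [pvRepAll, pvRep, pv_nm1, pv_nm2, pv_nm3, pv_nm4, pv_nm5, pv_nm6] at iht ⊢
            rw [pv_rep_skip _ _ _ _ (pv_np2 '1' d _ (hne _ (by decide))),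
                pv_rep_skip _ _ _ _ (pv_np1 '1' d _ hdR),
                pv_rep_skip _ _ _ _ (pv_np2 '2' d _ (hne _ (by decide))),
                pv_rep_skip _ _ _ _ (pv_np1 '2' d _ hdR),
                pv_rep_skip _ _ _ _ (pv_np2 '3' d _ (hne _ (by decide))),
                pv_rep_skip _ _ _ _ (pv_np1 '3' d _ hdR),
                pv_rep_skip _ _ _ _ (pv_np2 '4' d _ (hne _ (by decide))),
                pv_rep_skip _ _ _ _ (pv_np1 '4' d _ hdR),
                pv_rep_skip _ _ _ _ (pv_np2 '5' d _ (hne _ (by decide))),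
                pv_rep_skip _ _ _ _ (pv_np1 '5' d _ hdR),
                pv_rep_skip _ _ _ _ (pv_np2 '6' d _ (hne _ (by decide))),
                pv_rep_skip _ _ _ _ (pv_np1 '6' d _ hdR),
                iht]
            have hr : pvScan size ('R' :: d :: t) = 'R' :: d :: pvScan size t := by
              have h1 : pvScan size ('R' :: d :: t) = 'R' :: pvScan size (d :: t) := by
                simp [pvScan, hd]
              rw [h1, pv_scan_cons size d t hdR]
            rw [hr]
      · have ihl := ih (d :: t) hdt
        simp only [pvRepAll, pvRep] at ihl ⊢
        rw [pv_rep_skip _ _ _ _ (pv_np1 _ _ _ hc),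
            pv_rep_skip _ _ _ _ (pv_np1 _ _ _ hc),
            pv_rep_skip _ _ _ _ (pv_np1 _ _ _ hc),
            pv_rep_skip _ _ _ _ (pv_np1 _ _ _ hc),
            pv_rep_skip _ _ _ _ (pv_np1 _ _ _ hc),
            pv_rep_skip _ _ _ _ (pv_np1 _ _ _ hc),
            ihl]
        simp [pvScan, hc]

lemma pv_main' (size : Int) (l : List Char) :
    PySem.Chars.replace (PySem.Chars.replace (PySem.Chars.replace (PySem.Chars.replace (PySem.Chars.replace
      (PySem.Chars.replace l ['R', '1'] (pvTagB "one" size)) ['R', '2'] (pvTagB "two" size))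
      ['R', '3'] (pvTagB "three" size)) ['R', '4'] (pvTagB "four" size))
      ['R', '5'] (pvTagB "five" size)) ['R', '6'] (pvTagB "six" size) = pvScan size l := by
  have h := pv_main size l.length l le_rfl
  simp only [pvRepAll, pvRep, pv_nm1, pv_nm2, pv_nm3, pv_nm4, pv_nm5, pv_nm6] at h
  exact h

lemma pv_tagA_toList (name : String) (size : Int) : (pvTagA name size).toList = pvTagB name size := by
  simp [pvTagA, pvTagB, PySem.Int.toList_toStr]

-- ===== VERDICT (by name: the statement is the Claim_ definition above) =====
theorem add_dice_images_spec : Claim_equal_add_dice_images := by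
  intro s z _
  unfold Spec_add_dice_images
  
  show PySem.Str.replace (PySem.Str.replace (PySem.Str.replace (PySem.Str.replace (PySem.Str.replace
        (PySem.Str.replace s "R1" (pvTagA "one" z)) "R2" (pvTagA "two" z)) "R3" (pvTagA "three" z))
        "R4" (pvTagA "four" z)) "R5" (pvTagA "five" z)) "R6" (pvTagA "six" z)
      = add_dice_images_alt s z
  unfold PySem.Str.replace add_dice_images_alt
  rw [pv_tagA_toList, pv_tagA_toList, pv_tagA_toList, pv_tagA_toList, pv_tagA_toList, pv_tagA_toList]
  simp only [String.toList_ofList]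
  rw [show ("R1" : String).toList = ['R', '1'] from rfl,
      show ("R2" : String).toList = ['R', '2'] from rfl,
      show ("R3" : String).toList = ['R', '3'] from rfl,
      show ("R4" : String).toList = ['R', '4'] from rfl,
      show ("R5" : String).toList = ['R', '5'] from rfl,
      show ("R6" : String).toList = ['R', '6'] from rfl]
  rw [pv_main' z s.toList]
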